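-- pv_equiv track=rewrite | github.com/xiaoyuzaijia/PAT_Advance_level | 1086 Tree Traversals Again.py | get_posl
-- ===== SOURCE A (Python) =====
-- def get_posl(prel, inl):
--     if not prel:
--         return []
--     root = prel[0]
--     i = inl.index(root)
--     l_posl = get_posl(prel[1:i+1], inl[:i])
--     r_posl = get_posl(prel[i+1:], inl[i+1:])
--     return l_posl + r_posl + [root]
-- ===== SOURCE B (Python) =====
-- def get_posl(prel, inl):
--     if not prel:
--         return []
--     pos = {v: i for i, v in enumerate(inl)}
--     rev = []  # reversed postorder: root, right subtree, left subtree
--     stack = [(0, 0, len(inl))]  # (preorder start, inorder window [lo, hi))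
--     while stack:
--         k, lo, hi = stack.pop()
--         if lo >= hi:
--             continue
--         root = prel[k]
--         i = pos[root]
--         rev.append(root)
--         stack.append((k + 1, lo, i))                 # left subtree (popped last)
--         stack.append((k + 1 + (i - lo), i + 1, hi))  # right subtree (popped next)
--     return rev[::-1]
-- ===== Notes on version B (the rewrite author's own statement) =====
-- stated objective: alternative
-- what changed: Replaces A's recursion on list slices (with an inl.index linear scan per node) by an iterative explicit-stack traversal over integer (preorder-start, inorder-window) frames with a precomputed value-to-index dictionary, emitting the reversed postorder (root, right, left) into one list that is reversed at the end; no recursion, no list slicing, no linear scans.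
-- outside the precondition, e.g. on get_posl([1], [1, 2]): A returns [1], B raises IndexError; on get_posl([1, 1], [1, 1]): A returns [1, 1], B raises IndexError
import Mathlib
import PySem

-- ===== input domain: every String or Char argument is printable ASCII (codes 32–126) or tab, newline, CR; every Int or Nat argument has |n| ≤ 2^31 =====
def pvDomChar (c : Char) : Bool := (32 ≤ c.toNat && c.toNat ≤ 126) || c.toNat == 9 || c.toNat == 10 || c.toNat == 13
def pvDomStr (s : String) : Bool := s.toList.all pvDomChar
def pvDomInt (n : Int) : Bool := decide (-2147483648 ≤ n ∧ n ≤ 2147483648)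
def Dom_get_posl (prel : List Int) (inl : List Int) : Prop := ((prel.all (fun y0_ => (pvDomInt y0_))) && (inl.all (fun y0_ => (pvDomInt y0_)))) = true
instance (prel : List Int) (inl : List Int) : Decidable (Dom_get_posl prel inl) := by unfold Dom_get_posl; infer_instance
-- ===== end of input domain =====

-- B replaces A's slice-and-scan recursion by an iterative explicit-stack loop over integer
-- (preorder-start, inorder-window) frames with a precomputed value-to-index map, emitting the
-- reversed postorder and reversing once at the end (objective: alternative).

-- ===== PORT A =====
-- A recurses on list slices; `inl.index(root)` raises ValueError when root is absent
-- (that case is `none` below and is excluded by Pre_).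
def get_posl : List Int → List Int → List Int
  | [], _ => []                                   -- if not prel: return []
  | root :: rest, inl =>                          -- root = prel[0]
    match PySem.List.index? inl root with
    | none => []                                  -- Python: ValueError (excluded by Pre_)
    | some i =>
      get_posl (PySem.List.slice (root :: rest) (some 1) (some ((i : Int) + 1)))
               (PySem.List.slice inl none (some (i : Int)))            -- l_posl
      ++ get_posl (PySem.List.slice (root :: rest) (some ((i : Int) + 1)) none)
               (PySem.List.slice inl (some ((i : Int) + 1)) none)      -- r_posl
      ++ [root]                                   -- l_posl + r_posl + [root]
termination_by prel _ => prel.length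
decreasing_by
  · rw [show (1 : Int) = (((1 : Nat)) : Int) from rfl, ← Nat.cast_add,
        PySem.List.slice_natCast]
    simp
  · rw [show ((i : Int) + 1) = (((i + 1 : Nat)) : Int) by push_cast; ring,
        PySem.List.slice_from_natCast]
    simp

-- ===== PORT B =====
-- pos = {v: i for i, v in enumerate(inl)}
def pvPosMap (inl : List Int) : PySem.Dict Int Int :=
  (PySem.List.enumerate inl 0).foldl (fun d p => d.insert p.2 p.1) PySem.Dict.empty

-- the while loop: `stack` is the head of the frame list (push = cons, pop = head);
-- `prel[k]` / `pos[root]` raise IndexError / KeyError in Python where the matches below see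
-- `none` (excluded by Pre_); the bounds test on i only makes the loop total — under Pre_ it
-- always holds (the root's inorder index lies inside the frame's window).
def pvLoop (prel : List Int) (pos : PySem.Dict Int Int) :
    List (Int × Int × Int) → List Int → List Int
  | [], rev => rev                                -- while stack: … exits
  | (k, lo, hi) :: st, rev =>                     -- k, lo, hi = stack.pop()
    if _h : lo < hi then
      match PySem.List.pyGet? prel k with
      | none => pvLoop prel pos st rev            -- Python: IndexError (excluded by Pre_)
      | some root =>
        match pos.get? root with
        | none => pvLoop prel pos st rev          -- Python: KeyError (excluded by Pre_)
        | some i =>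
          if _h2 : lo ≤ i ∧ i < hi then
            pvLoop prel pos
              ((k + 1 + (i - lo), i + 1, hi) :: (k + 1, lo, i) :: st)  -- push left, push right
              (rev ++ [root])                     -- rev.append(root)
          else pvLoop prel pos st rev             -- unreachable under Pre_ (totality guard)
    else pvLoop prel pos st rev                   -- if lo >= hi: continue
termination_by st _ => 2 * (st.map (fun f => (f.2.2 - f.2.1).toNat)).sum + st.length
decreasing_by all_goals (simp only [List.map_cons, List.sum_cons, List.length_cons]; omega)

def get_posl_alt (prel : List Int) (inl : List Int) : List Int :=
  if prel = [] then []                            -- if not prel: return []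
  else (pvLoop prel (pvPosMap inl)
          [(0, 0, PySem.List.len inl)] []).reverse   -- rev[::-1] (PySem.List.slice?_none_none_neg_one)

-- ===== PRECONDITION & SPEC =====
-- Pre_ admits the empty preorder and exactly the pairs (prel, inl) that are the preorder
-- and inorder of one binary tree with distinct labels (duplicate-free, same elements, and
-- no "231" pattern: prel never visits x, then something right of x in inl, then something
-- left of x).  On other pairs A raises ValueError, except for accidental values produced
-- by the empty-preorder short-circuit (e.g. prel=[1], inl=[1,2]) on which B raises instead.
def Pre_get_posl (prel : List Int) (inl : List Int) : Prop :=
  prel = [] ∨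
  (inl.Nodup ∧ prel.Perm inl ∧
    ∀ c, c < prel.length → ∀ b, b < c → ∀ a, a < b →
      ¬ (inl.idxOf (prel.getD c 0) < inl.idxOf (prel.getD a 0) ∧
         inl.idxOf (prel.getD a 0) < inl.idxOf (prel.getD b 0)))
instance (prel : List Int) (inl : List Int) : Decidable (Pre_get_posl prel inl) := by
  unfold Pre_get_posl; infer_instance

def pvWitness_get_posl : List Int × List Int := ([2, 1, 3], [1, 2, 3])

def Spec_get_posl (prel : List Int) (inl : List Int) (out : List Int) : Prop := out = get_posl_alt prel inl
instance (prel : List Int) (inl : List Int) (out : List Int) : Decidable (Spec_get_posl prel inl out) := by unfold Spec_get_posl; infer_instance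

-- ===== CLAIM (what is proved, stated in full; the proofs are below) =====
def Claim_equal_get_posl : Prop := ∀ (prel : List Int) (inl : List Int), Dom_get_posl prel inl → Pre_get_posl prel inl → Spec_get_posl prel inl (get_posl prel inl)

-- ===== LEMMAS AND PROOFS =====

lemma pv_getD_seg (l : List Int) (u v c : Nat) (hc : c < v) (h : u + v ≤ l.length) :
    ((l.drop u).take v).getD c 0 = l.getD (u + c) 0 := by
  have h1 : c < ((l.drop u).take v).length := by simp; omega
  have h2 : u + c < l.length := by omega
  rw [List.getD_eq_getElem _ _ h1, List.getD_eq_getElem _ _ h2]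
  simp [List.getElem_take, List.getElem_drop]

lemma pv_mem_seg {inl : List Int} (hnd : inl.Nodup) {lo m : Nat} {x : Int} :
    x ∈ (inl.drop lo).take m ↔ x ∈ inl ∧ lo ≤ inl.idxOf x ∧ inl.idxOf x < lo + m := by
  constructor
  · intro hx
    obtain ⟨j, hj, hget⟩ := List.mem_iff_getElem.mp hx
    have hj' : lo + j < inl.length := by
      have := hj; simp at this; omega
    have : inl[lo + j]'hj' = x := by
      rw [← hget]; simp [List.getElem_take, List.getElem_drop]
    have hidx : inl.idxOf x = lo + j := by
      rw [← this]; exact List.Nodup.idxOf_getElem hnd _ hj'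
    have hjm : j < m := by have := hj; simp at this; omega
    exact ⟨this ▸ List.getElem_mem hj', by omega, by omega⟩
  · rintro ⟨hmem, hge, hlt⟩
    have hlen : inl.idxOf x < inl.length := List.idxOf_lt_length_of_mem hmem
    have hj : inl.idxOf x - lo < (inl.drop lo).length := by simp; omega
    have hjm : inl.idxOf x - lo < m := by omega
    have : ((inl.drop lo).take m)[inl.idxOf x - lo]'(by simp; omega) = x := by
      simp only [List.getElem_take, List.getElem_drop]
      have := List.getElem_idxOf hlen
      simp only [show lo + (inl.idxOf x - lo) = inl.idxOf x from by omega]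
      exact this
    exact this ▸ List.getElem_mem _

lemma pv_foldl_enum_get? (ys : List Int) (hnd : ys.Nodup) (d : PySem.Dict Int Int) (s : Int)
    (x : Int) :
    ((PySem.List.enumerate ys s).foldl (fun d p => d.insert p.2 p.1) d).get? x
      = if x ∈ ys then some (s + (ys.idxOf x : Int)) else d.get? x := by
  induction ys generalizing d s with
  | nil => simp [PySem.List.enumerate_nil]
  | cons y t ih =>
    rw [PySem.List.enumerate_cons]
    simp only [List.foldl_cons]
    rw [ih (List.Nodup.of_cons hnd) _ (s + 1)]
    by_cases hxy : x = y
    · subst hxy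
      have hxt : x ∉ t := (List.nodup_cons.mp hnd).1
      simp [hxt, PySem.Dict.get?_insert_self]
    · by_cases hxt : x ∈ t
      · simp only [List.mem_cons, hxy, false_or, if_pos hxt]
        rw [List.idxOf_cons_ne _ (by exact fun h => hxy h.symm)]
        congr 1
        push_cast
        ring
      · have : x ∉ y :: t := by simp [hxy, hxt]
        simp only [if_neg hxt, if_neg this]
        exact PySem.Dict.get?_insert_of_ne d s hxy

lemma pv_posMap_get? (inl : List Int) (hnd : inl.Nodup) (x : Int) :
    (pvPosMap inl).get? x = if x ∈ inl then some ((inl.idxOf x : Int)) else none := by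
  unfold pvPosMap
  rw [pv_foldl_enum_get? inl hnd _ 0 x]
  simp [PySem.Dict.get?_empty]

lemma pv_get_posl_cons (root : Int) (rest inl : List Int) (i : Nat)
    (h : PySem.List.index? inl root = some i) :
    get_posl (root :: rest) inl
      = get_posl (rest.take i) (inl.take i)
        ++ get_posl (rest.drop i) (inl.drop (i + 1)) ++ [root] := by
  rw [get_posl, h]
  dsimp only
  congr 1
  · congr 1
    · congr 1
      · rw [show (1 : Int) = (((1 : Nat)) : Int) from rfl, ← Nat.cast_add,
            PySem.List.slice_natCast]
        simp
      · exact PySem.List.slice_to_natCast ..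
    · congr 1
      · rw [show ((i : Int) + 1) = (((i + 1 : Nat)) : Int) by push_cast; ring,
            PySem.List.slice_from_natCast]
        simp
      · rw [show ((i : Int) + 1) = (((i + 1 : Nat)) : Int) by push_cast; ring,
            PySem.List.slice_from_natCast]

lemma pv_split (inl : List Int) (hnd : inl.Nodup) (lo m il : Nat) (root : Int)
    (Prest : List Int) (hm : lo + m ≤ inl.length) (hil : il < m)
    (hroot : inl.idxOf root = lo + il) (hrootmem : root ∈ inl)
    (hperm : (root :: Prest).Perm ((inl.drop lo).take m))
    (h231 : ∀ a b c : Nat, a < b → b < c → c < (root :: Prest).length →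
       ¬ (inl.idxOf ((root :: Prest).getD c 0) < inl.idxOf ((root :: Prest).getD a 0) ∧
          inl.idxOf ((root :: Prest).getD a 0) < inl.idxOf ((root :: Prest).getD b 0))) :
    (Prest.take il).Perm ((inl.drop lo).take il) ∧
    (Prest.drop il).Perm ((inl.drop (lo + il + 1)).take (m - il - 1)) := by
  set S := (inl.drop lo).take m with hS
  set T := (inl.drop lo).take il with hT
  set D := (inl.drop (lo + il + 1)).take (m - il - 1) with hD
  have hilen : inl.idxOf root < inl.length := List.idxOf_lt_length_of_mem hrootmem
  have hndS : S.Nodup :=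
    List.Nodup.sublist ((List.take_sublist _ _).trans (List.drop_sublist _ _)) hnd
  have hndP : (root :: Prest).Nodup := hperm.nodup_iff.mpr hndS
  have hSlen : S.length = m := by simp [hS]; omega
  have hPlen : Prest.length + 1 = m := by
    have := hperm.length_eq; simp [hSlen] at this; omega
  have hil' : il ≤ Prest.length := by omega
  have hSil : ∀ h : il < S.length, S[il] = root := by
    intro h
    have : S[il]'h = inl[lo + il]'(by omega) := by
      simp [hS, List.getElem_take, List.getElem_drop]
    rw [this]
    have h2 : inl[inl.idxOf root]'hilen = root := List.getElem_idxOf hilen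
    simpa [hroot] using h2
  have hTD : S.drop (il + 1) = D := by
    simp [hS, hD, List.drop_take, List.drop_drop]
    rw [show m - (il + 1) = m - il - 1 from by omega,
        show lo + (il + 1) = lo + il + 1 from by omega]
  have hTT : S.take il = T := by
    simp [hS, hT, List.take_take, min_eq_left (le_of_lt hil)]
  have hSdecomp : S = T ++ root :: D := by
    conv_lhs => rw [← List.take_append_drop il S]
    rw [hTT]
    congr 1
    rw [← hTD]
    rw [← List.getElem_cons_drop (by omega)]
    rw [hSil (by omega)]
  have hPrest_perm : Prest.Perm (T ++ D) := by
    have h1 : (root :: Prest).Perm (T ++ root :: D) := by rw [← hSdecomp]; exact hperm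
    have h2 : (T ++ root :: D).Perm (root :: (T ++ D)) := List.perm_middle
    exact (List.perm_cons root).mp (h1.trans h2)
  set p : Int → Bool := fun x => decide (inl.idxOf x < lo + il) with hp
  have hTlen : T.length = il := by simp [hT]; omega
  have hTsmall : ∀ x ∈ T, p x = true := by
    intro x hx
    have := (pv_mem_seg hnd).mp (hT ▸ hx)
    simp only [hp, decide_eq_true_eq]
    omega
  have hDbig : ∀ x ∈ D, p x = false := by
    intro x hx
    have := (pv_mem_seg hnd).mp (hD ▸ hx)
    simp only [hp, decide_eq_false_iff_not]
    omega
  have cP : Prest.countP p = il := by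
    rw [hPrest_perm.countP_eq]
    rw [List.countP_append]
    rw [List.countP_eq_length.mpr hTsmall, hTlen]
    rw [List.countP_eq_zero.mpr (by intro a ha; simpa using hDbig a ha)]
    omega
  have hPmem : ∀ x ∈ Prest, x ∈ inl ∧ lo ≤ inl.idxOf x ∧ inl.idxOf x < lo + m ∧
      inl.idxOf x ≠ lo + il := by
    intro x hx
    have hxS : x ∈ S := by
      rw [hSdecomp]
      have := hPrest_perm.subset hx
      simp at this ⊢
      tauto
    have h1 := (pv_mem_seg hnd).mp (hS ▸ hxS)
    refine ⟨h1.1, h1.2.1, h1.2.2, ?_⟩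
    intro heq
    have hxroot : x = root := by
      have hx1 : inl[inl.idxOf x]'(List.idxOf_lt_length_of_mem h1.1) = x :=
        List.getElem_idxOf _
      have hx2 : inl[inl.idxOf root]'hilen = root := List.getElem_idxOf _
      rw [← hx1, ← hx2]
      congr 1
      omega
    subst hxroot
    exact (List.nodup_cons.mp hndP).1 hx
  have hgetDmem : ∀ j : Nat, j < Prest.length → Prest.getD j 0 ∈ Prest := by
    intro j hj
    rw [List.getD_eq_getElem _ _ hj]
    exact List.getElem_mem hj
  have hmono : ∀ j j' : Nat, j < j' → j' < Prest.length →
      p (Prest.getD j 0) = false → p (Prest.getD j' 0) = false := by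
    intro j j' hjj hj' hfalse
    by_contra htrue
    rw [Bool.not_eq_false] at htrue
    have hmemj := hPmem _ (hgetDmem j (by omega))
    have hmemj' := hPmem _ (hgetDmem j' hj')
    have hlt1 : inl.idxOf (Prest.getD j' 0) < inl.idxOf root := by
      simp only [hp, decide_eq_true_eq] at htrue
      omega
    have hlt2 : inl.idxOf root < inl.idxOf (Prest.getD j 0) := by
      obtain ⟨-, -, -, hne⟩ := hmemj
      simp only [hp, decide_eq_false_iff_not] at hfalse
      omega
    have := h231 0 (j + 1) (j' + 1) (by omega) (by omega) (by simp; omega)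
    simp only [List.getD_cons_succ, List.getD_cons_zero] at this
    exact this ⟨hlt1, hlt2⟩
  have htake_small : ∀ j : Nat, j < il → p (Prest.getD j 0) = true := by
    intro j hj
    by_contra hfalse
    rw [Bool.not_eq_true] at hfalse
    have hjlen : j < Prest.length := by omega
    have hdrop0 : (Prest.drop j).countP p = 0 := by
      rw [List.countP_eq_zero]
      intro a ha
      obtain ⟨jd, hjd, hget⟩ := List.mem_iff_getElem.mp ha
      have hlen : jd + j < Prest.length := by simp at hjd; omega
      have hval : a = Prest.getD (j + jd) 0 := by
        rw [List.getD_eq_getElem _ _ (by omega), ← hget]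
        rw [List.getElem_drop]
      rcases Nat.eq_zero_or_pos jd with h0 | h0
      · subst h0; rw [hval]; simp only [Nat.add_zero]; rw [hfalse]; simp
      · rw [hval, hmono j (j + jd) (by omega) (by omega) hfalse]; simp
    have : Prest.countP p ≤ j := by
      conv_lhs => rw [← List.take_append_drop j Prest]
      rw [List.countP_append, hdrop0]
      have := List.countP_le_length (l := Prest.take j) (p := p)
      simp at this ⊢
      omega
    omega
  have hsubset : Prest.take il ⊆ T := by
    intro x hx
    obtain ⟨j, hj, hget⟩ := List.mem_iff_getElem.mp hx
    have hjil : j < il := by simp at hj; omega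
    have hjlen : j < Prest.length := by simp at hj; omega
    have hxval : x = Prest.getD j 0 := by
      rw [List.getD_eq_getElem _ _ hjlen, ← hget]
      simp [List.getElem_take]
    have hsmall := htake_small j hjil
    have hmem := hPmem _ (hgetDmem j hjlen)
    rw [hT]
    apply (pv_mem_seg hnd).mpr
    rw [hxval]
    simp only [hp, decide_eq_true_eq] at hsmall
    exact ⟨hmem.1, hmem.2.1, by omega⟩
  have hndtake : (Prest.take il).Nodup :=
    List.Nodup.sublist (List.take_sublist _ _) (List.nodup_cons.mp hndP).2
  have hperma : (Prest.take il).Perm T := by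
    apply List.Subperm.perm_of_length_le (List.subperm_of_subset hndtake hsubset)
    simp [hTlen]
    omega
  refine ⟨hperma, ?_⟩
  have h3 : (Prest.take il ++ Prest.drop il).Perm (T ++ D) := by
    rw [List.take_append_drop]; exact hPrest_perm
  have h4 : (T ++ Prest.drop il).Perm (T ++ D) :=
    (hperma.symm.append_right _).trans h3
  exact (List.perm_append_left_iff T).mp h4

-- one valid frame is consumed as a whole: it contributes the reverse of A's answer on its
-- segments, and the loop continues on the rest of the stack.
lemma pv_loop_eq (inl prel : List Int) (hnd : inl.Nodup) (m : Nat) :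
    ∀ lo k : Nat, ∀ st : List (Int × Int × Int), ∀ rev : List Int,
    lo + m ≤ inl.length → k + m ≤ prel.length →
    ((prel.drop k).take m).Perm ((inl.drop lo).take m) →
    (∀ a b c : Nat, a < b → b < c → c < m →
       ¬ (inl.idxOf (prel.getD (k + c) 0) < inl.idxOf (prel.getD (k + a) 0) ∧
          inl.idxOf (prel.getD (k + a) 0) < inl.idxOf (prel.getD (k + b) 0))) →
    pvLoop prel (pvPosMap inl) (((k : Int), (lo : Int), (lo : Int) + (m : Int)) :: st) rev
      = pvLoop prel (pvPosMap inl) st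
          (rev ++ (get_posl ((prel.drop k).take m) ((inl.drop lo).take m)).reverse) := by
  induction m using Nat.strong_induction_on with
  | _ m ih =>
  intro lo k st rev hlo hk hperm h231
  rcases Nat.eq_zero_or_pos m with hm0 | hmpos
  · subst hm0
    rw [pvLoop]
    rw [dif_neg (by omega)]
    simp [get_posl]
  · have hkl : k < prel.length := by omega
    set S := (inl.drop lo).take m with hS
    set root := prel[k]'hkl with hroot_def
    set Prest := (prel.drop (k + 1)).take (m - 1) with hPrest
    have hPcons : (prel.drop k).take m = root :: Prest := by
      rw [List.drop_eq_getElem_cons hkl, ← hroot_def,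
          show m = (m - 1) + 1 from by omega, List.take_succ_cons, hPrest]
    have hSlen : S.length = m := by simp [hS]; omega
    have hrootS : root ∈ S := by
      have : root ∈ (prel.drop k).take m := by rw [hPcons]; exact List.mem_cons_self
      exact hperm.subset this
    have hrootseg := (pv_mem_seg hnd).mp (hS ▸ hrootS)
    have hrootmem : root ∈ inl := hrootseg.1
    set t := inl.idxOf root with ht
    have hts : lo ≤ t ∧ t < lo + m := ⟨hrootseg.2.1, hrootseg.2.2⟩
    set il := t - lo with hil_def
    have hil : il < m := by omega
    have htval : t = lo + il := by omega
    -- one iteration of the loop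
    rw [pvLoop]
    rw [dif_pos (by push_cast; omega)]
    have hget : PySem.List.pyGet? prel ((k : Nat) : Int) = some root := by
      rw [PySem.List.pyGet?_natCast]
      exact List.getElem?_eq_getElem hkl
    rw [hget]
    dsimp only
    rw [pv_posMap_get? inl hnd root, if_pos hrootmem]
    dsimp only
    rw [dif_pos (show ((lo:Nat):Int) ≤ ((inl.idxOf root : Nat):Int) ∧ ((inl.idxOf root : Nat):Int) < ((lo:Nat):Int) + ((m:Nat):Int) by constructor <;> (push_cast; omega))]
    have hsplit := pv_split inl hnd lo m il root Prest hlo hil (by omega) hrootmem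
      (hPcons ▸ hperm)
      (by
        intro a b c hab hbc hc
        have hc' : c < m := by
          have : (root :: Prest).length = m := by
            rw [← hPcons]; simp; omega
          omega
        have := h231 a b c hab hbc hc'
        have hgd : ∀ j : Nat, j < m → (root :: Prest).getD j 0 = prel.getD (k + j) 0 := by
          intro j hj
          rw [← hPcons]
          exact pv_getD_seg prel k m j hj (by omega)
        rw [hgd a (by omega), hgd b (by omega), hgd c (by omega)]
        exact this)
    -- the pushed frames as casts of Nat frames
    have e1 : ((k : Nat) : Int) + 1 = (((k + 1 : Nat)) : Int) := by push_cast; ring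
    have e2 : ((inl.idxOf root : Nat) : Int) = ((lo : Nat) : Int) + ((il : Nat) : Int) := by
      rw [← ht]; push_cast; omega
    have e3 : ((k : Nat) : Int) + 1 + (((inl.idxOf root : Nat) : Int) - ((lo : Nat) : Int))
        = (((k + 1 + il : Nat)) : Int) := by rw [← ht]; push_cast; omega
    have e4 : ((inl.idxOf root : Nat) : Int) + 1 = (((lo + il + 1 : Nat)) : Int) := by
      rw [← ht]; push_cast; omega
    have e5 : ((lo : Nat) : Int) + ((m : Nat) : Int)
        = (((lo + il + 1 : Nat)) : Int) + (((m - il - 1 : Nat)) : Int) := by push_cast; omega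
    rw [e3, e4, e5, e2, e1]
    -- right frame (head of the stack) is consumed first
    rw [ih (m - il - 1) (by omega) (lo + il + 1) (k + 1 + il)
      (((((k + 1 : Nat)) : Int), ((lo : Nat) : Int), ((lo : Nat) : Int) + ((il : Nat) : Int)) :: st)
      (rev ++ [root])
      (by omega) (by omega)
      (by
        have hPr : (prel.drop (k + 1 + il)).take (m - il - 1) = Prest.drop il := by
          rw [hPrest, List.drop_take, List.drop_drop,
              show m - 1 - il = m - il - 1 from by omega,
              show (k + 1) + il = k + 1 + il from rfl]
        rw [hPr]; exact hsplit.2)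
      (by
        intro a b c hab hbc hc
        have := h231 (a + il + 1) (b + il + 1) (c + il + 1) (by omega) (by omega) (by omega)
        rw [show k + (c + il + 1) = k + 1 + il + c from by omega,
            show k + (a + il + 1) = k + 1 + il + a from by omega,
            show k + (b + il + 1) = k + 1 + il + b from by omega] at this
        exact this)]
    -- then the left frame
    rw [ih il hil lo (k + 1) st
      (rev ++ [root] ++ (get_posl ((prel.drop (k + 1 + il)).take (m - il - 1))
        ((inl.drop (lo + il + 1)).take (m - il - 1))).reverse)
      (by omega) (by omega)
      (by
        have hPl : (prel.drop (k + 1)).take il = Prest.take il := by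
          rw [hPrest, List.take_take, min_eq_left (by omega)]
        rw [hPl]; exact hsplit.1)
      (by
        intro a b c hab hbc hc
        have := h231 (a + 1) (b + 1) (c + 1) (by omega) (by omega) (by omega)
        rw [show k + (c + 1) = k + 1 + c from by omega, show k + (a + 1) = k + 1 + a from by omega,
            show k + (b + 1) = k + 1 + b from by omega] at this
        exact this)]
    -- assemble with A's one-step unfolding
    have hidxS : PySem.List.index? S root = some il := by
      rw [PySem.List.index?_eq_idxOf?, List.idxOf?_eq_some_iff]
      refine ⟨by omega, ?_, ?_⟩
      · have : S[il]'(by omega) = inl[lo + il]'(by omega) := by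
          simp [hS, List.getElem_take, List.getElem_drop]
        rw [this]
        have h2 : inl[inl.idxOf root]'(List.idxOf_lt_length_of_mem hrootmem) = root :=
          List.getElem_idxOf _
        simpa [← ht, htval] using h2
      · intro j hj hjr
        have : S[j]'(by omega) = inl[lo + j]'(by omega) := by
          simp [hS, List.getElem_take, List.getElem_drop]
        rw [this] at hjr
        have : inl.idxOf root = lo + j := by
          rw [← hjr]
          exact List.Nodup.idxOf_getElem hnd _ _
        omega
    have hacons : get_posl ((prel.drop k).take m) S
        = get_posl (Prest.take il) (S.take il)
          ++ get_posl (Prest.drop il) (S.drop (il + 1)) ++ [root] := by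
      rw [hPcons]
      exact pv_get_posl_cons root Prest S il hidxS
    have hStake : S.take il = (inl.drop lo).take il := by
      simp [hS, List.take_take, min_eq_left (le_of_lt hil)]
    have hSdrop : S.drop (il + 1) = (inl.drop (lo + il + 1)).take (m - il - 1) := by
      simp [hS, List.drop_take, List.drop_drop]
      rw [show m - (il + 1) = m - il - 1 from by omega,
          show lo + (il + 1) = lo + il + 1 from by omega]
    have hPl : (prel.drop (k + 1)).take il = Prest.take il := by
      rw [hPrest, List.take_take, min_eq_left (by omega)]
    have hPr : (prel.drop (k + 1 + il)).take (m - il - 1) = Prest.drop il := by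
      rw [hPrest, List.drop_take, List.drop_drop,
          show m - 1 - il = m - il - 1 from by omega,
          show (k + 1) + il = k + 1 + il from rfl]
    congr 1
    rw [hacons, hStake, hSdrop, hPl, hPr]
    simp [List.reverse_append, List.append_assoc]

-- ===== VERDICT (by name: the statement is the Claim_ definition above) =====
theorem get_posl_spec : Claim_equal_get_posl := by
  intro prel inl _hdom hpre
  unfold Spec_get_posl
  rcases hpre with hnil | ⟨hnd, hperm, h231⟩
  · subst hnil; simp [get_posl, get_posl_alt]
  · by_cases hp : prel = []
    · subst hp; simp [get_posl, get_posl_alt]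
    · have hlen : prel.length = inl.length := hperm.length_eq
      have hmain := pv_loop_eq inl prel hnd inl.length 0 0 [] []
        (by omega) (by omega)
        (by simpa [List.take_of_length_le, hlen] using hperm)
        (by
          intro a b c hab hbc hc
          have := h231 c (by omega) b hbc a hab
          simpa using this)
      unfold get_posl_alt
      rw [if_neg hp, PySem.List.len_eq]
      rw [show ((inl.length : Nat) : Int) = (((0:Nat) : Int) + (inl.length : Int)) by push_cast; ring,
          show (0 : Int) = ((0 : Nat) : Int) from rfl]
      rw [hmain, pvLoop]
      simp [List.take_of_length_le, hlen]
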